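-- pv_equiv track=rewrite | github.com/tomasnyberg/cp_notebook | codeforces/edu126/C.py | solve
-- ===== SOURCE A (Python) =====
-- def solve(target, nums):
--     needed = 0
--     for x in nums:
--         needed += target - x
--     low = 0
--     high = 10**20
--     res = -1
--     while low <= high:
--         mid = (low + high) // 2
--         cnt1 = (mid + 1)//2; cnt2 = mid // 2
--         need1 = 0
--         for x in nums:
--             cur = (target -x) //2
--             if(target - x) % 2 == 1:
--                 need1 += 1
--             if cnt2 >= cur:
--                 cnt2 -= cur
--             else:
--                 cur -= cnt2
--                 cnt2 = 0
--                 need1 += cur*2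
--         if need1 <= cnt1:
--             res = mid
--             high = mid - 1
--         else:
--             low = mid + 1
--     return res
-- ===== SOURCE B (Python) =====
-- def solve(target, nums):
--     # One pass: count odd deficits and the maximum prefix sum of halved deficits,
--     # then binary search with an O(1) feasibility check.
--     odd = 0
--     mx = 0
--     p = 0
--     for x in nums:
--         d = target - x
--         odd += d % 2
--         p += d // 2
--         if p > mx:
--             mx = p
--     lo, hi, res = 0, 10**20, -1
--     while lo <= hi:
--         mid = (lo + hi) // 2
--         short = mx - mid // 2
--         if short < 0:
--             short = 0
--         if odd + 2 * short <= (mid + 1) // 2: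
--             res = mid
--             hi = mid - 1
--         else:
--             lo = mid + 1
--     return res
-- ===== Notes on version B (the rewrite author's own statement) =====
-- stated objective: faster
-- what changed: Replaces the O(n) greedy simulation inside every binary-search step by a one-time pass computing the odd-deficit count and the maximum prefix sum of halved deficits, making each feasibility check O(1).
import Mathlib
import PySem

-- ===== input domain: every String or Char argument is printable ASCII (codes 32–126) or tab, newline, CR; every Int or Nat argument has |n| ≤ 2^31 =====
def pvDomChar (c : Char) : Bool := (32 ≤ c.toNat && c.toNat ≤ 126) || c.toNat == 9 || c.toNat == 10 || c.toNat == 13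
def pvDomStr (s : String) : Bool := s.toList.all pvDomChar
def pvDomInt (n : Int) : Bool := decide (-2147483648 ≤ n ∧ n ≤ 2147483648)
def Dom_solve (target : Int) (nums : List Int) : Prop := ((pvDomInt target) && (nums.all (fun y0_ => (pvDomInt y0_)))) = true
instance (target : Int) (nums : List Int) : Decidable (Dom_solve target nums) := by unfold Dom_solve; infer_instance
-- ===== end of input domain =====

-- B replaces A's O(n) greedy simulation in every binary-search step by a precomputed
-- odd-deficit count and maximum prefix sum of halved deficits, giving O(1) checks.

-- ===== PORT A =====
-- the inner 'for x in nums' loop of A's while body, state (need1, cnt2)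
def solveInner (target : Int) : List Int → Int → Int → Int
  | [], need1, _ => need1
  | x :: xs, need1, cnt2 =>
    let cur := PySem.Int.floordiv (target - x) 2
    let need1 := if PySem.Int.mod (target - x) 2 = 1 then need1 + 1 else need1
    if cnt2 ≥ cur then solveInner target xs need1 (cnt2 - cur)
    else solveInner target xs (need1 + (cur - cnt2) * 2) 0

-- the 'while low <= high' loop of A (fuel only makes the loop structurally total;
-- the range [0, 10^20] halves each step, so 200 is never exhausted)
def solveLoop (target : Int) (nums : List Int) : Nat → Int → Int → Int → Int
  | 0, _, _, res => res
  | fuel + 1, low, high, res =>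
    if low ≤ high then
      let mid := PySem.Int.floordiv (low + high) 2
      let cnt1 := PySem.Int.floordiv (mid + 1) 2
      let cnt2 := PySem.Int.floordiv mid 2
      let need1 := solveInner target nums 0 cnt2
      if need1 ≤ cnt1 then solveLoop target nums fuel low (mid - 1) mid
      else solveLoop target nums fuel (mid + 1) high res
    else res

def solve (target : Int) (nums : List Int) : Int :=
  let _needed := nums.foldl (fun acc x => acc + (target - x)) 0
  solveLoop target nums 200 0 (10 ^ 20) (-1)

-- ===== PORT B =====
-- B's single pass over nums, state (odd, mx, p)
def altScan (target : Int) : List Int → Int × Int × Int → Int × Int × Int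
  | [], s => s
  | x :: xs, (odd, mx, p) =>
    let d := target - x
    let odd := odd + PySem.Int.mod d 2
    let p := p + PySem.Int.floordiv d 2
    let mx := if p > mx then p else mx
    altScan target xs (odd, mx, p)

-- B's 'while lo <= hi' loop with the O(1) feasibility check (same fuel remark as A's loop)
def altLoop (odd mx : Int) : Nat → Int → Int → Int → Int
  | 0, _, _, res => res
  | fuel + 1, lo, hi, res =>
    if lo ≤ hi then
      let mid := PySem.Int.floordiv (lo + hi) 2
      let short := mx - PySem.Int.floordiv mid 2
      let short := if short < 0 then 0 else short
      if odd + 2 * short ≤ PySem.Int.floordiv (mid + 1) 2 then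
        altLoop odd mx fuel lo (mid - 1) mid
      else altLoop odd mx fuel (mid + 1) hi res
    else res

def solve_alt (target : Int) (nums : List Int) : Int :=
  let s := altScan target nums (0, 0, 0)
  altLoop s.1 s.2.1 200 0 (10 ^ 20) (-1)

-- ===== PRECONDITION & SPEC =====
def Spec_solve (target : Int) (nums : List Int) (out : Int) : Prop := out = solve_alt target nums
instance (target : Int) (nums : List Int) (out : Int) : Decidable (Spec_solve target nums out) := by unfold Spec_solve; infer_instance

-- ===== CLAIM (what is proved, stated in full; the proofs are below) =====
def Claim_equal_solve : Prop := ∀ (target : Int) (nums : List Int), Dom_solve target nums → Spec_solve target nums (solve target nums)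

-- ===== LEMMAS AND PROOFS =====

-- spec functions: odd-deficit count and max(0, max over nonempty prefixes of sums of halved deficits)
def oddS (target : Int) : List Int → Int
  | [] => 0
  | x :: xs => PySem.Int.mod (target - x) 2 + oddS target xs

def sumS (target : Int) : List Int → Int
  | [] => 0
  | x :: xs => PySem.Int.floordiv (target - x) 2 + sumS target xs

def maxS (target : Int) : List Int → Int
  | [] => 0
  | x :: xs => max 0 (PySem.Int.floordiv (target - x) 2 + maxS target xs)

-- max over the nonempty prefixes of x :: xs (no 0 clamp)
def maxP (target : Int) : Int → List Int → Int
  | x, [] => PySem.Int.floordiv (target - x) 2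
  | x, y :: ys => max (PySem.Int.floordiv (target - x) 2)
      (PySem.Int.floordiv (target - x) 2 + maxP target y ys)

theorem maxS_nonneg (target : Int) (xs : List Int) : 0 ≤ maxS target xs := by
  cases xs <;> simp [maxS]

theorem mod_two_cases (d : Int) : PySem.Int.mod d 2 = 0 ∨ PySem.Int.mod d 2 = 1 := by
  have h0 := PySem.Int.mod_nonneg d (b := 2) (by omega)
  have h1 := PySem.Int.mod_lt d (b := 2) (by omega)
  omega

-- A's inner loop in closed form
theorem solveInner_eq (target : Int) (xs : List Int) :
    ∀ n c, 0 ≤ c → solveInner target xs n c = n + oddS target xs + 2 * max 0 (maxS target xs - c) := by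
  induction xs with
  | nil => intro n c hc; simp only [solveInner, oddS, maxS]; omega
  | cons x ys ih =>
    intro n c hc
    have hm := maxS_nonneg target ys
    simp only [solveInner, oddS, maxS]
    rcases mod_two_cases (target - x) with h | h <;> simp only [h] <;>
      split_ifs with hge <;> rw [ih _ _ (by omega)] <;> omega

-- B's scan in closed form
theorem altScan_eq (target : Int) (x : Int) (xs : List Int) :
    ∀ o m p, altScan target (x :: xs) (o, m, p) =
      (o + oddS target (x :: xs), max m (p + maxP target x xs),
       p + sumS target (x :: xs)) := by
  induction xs generalizing x with
  | nil =>
    intro o m p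
    simp only [altScan, oddS, sumS, maxP, Prod.mk.injEq]
    split_ifs <;> refine ⟨by omega, by omega, by omega⟩
  | cons y ys ih =>
    intro o m p
    have step : altScan target (x :: y :: ys) (o, m, p)
        = altScan target (y :: ys)
            (o + PySem.Int.mod (target - x) 2,
             (if p + PySem.Int.floordiv (target - x) 2 > m
              then p + PySem.Int.floordiv (target - x) 2 else m),
             p + PySem.Int.floordiv (target - x) 2) := rfl
    rw [step, ih]
    simp only [oddS, sumS, maxP, Prod.mk.injEq]
    split_ifs <;> refine ⟨by omega, by omega, by omega⟩

theorem maxS_eq_maxP (target : Int) (x : Int) (xs : List Int) :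
    maxS target (x :: xs) = max 0 (maxP target x xs) := by
  induction xs generalizing x with
  | nil => simp only [maxS, maxP]; omega
  | cons y ys ih =>
    simp only [maxS, maxP] at *
    have := ih y
    omega

theorem altScan_spec (target : Int) (xs : List Int) :
    altScan target xs (0, 0, 0) = (oddS target xs, maxS target xs, sumS target xs) := by
  cases xs with
  | nil => simp [altScan, oddS, maxS, sumS]
  | cons x ys =>
    rw [altScan_eq, maxS_eq_maxP]
    simp

theorem floordiv_two_nonneg (a : Int) (ha : 0 ≤ a) : 0 ≤ PySem.Int.floordiv a 2 := by
  have h1 := PySem.Int.floordiv_mul_add_mod a 2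
  have h2 := PySem.Int.mod_nonneg a (b := 2) (by omega)
  have h3 := PySem.Int.mod_lt a (b := 2) (by omega)
  omega

-- the two binary-search loops coincide (lo stays nonnegative throughout)
theorem loop_eq (target : Int) (nums : List Int) :
    ∀ fuel lo hi res, 0 ≤ lo →
      solveLoop target nums fuel lo hi res
        = altLoop (oddS target nums) (maxS target nums) fuel lo hi res := by
  intro fuel
  induction fuel with
  | zero => intro lo hi res _; rfl
  | succ f ih =>
    intro lo hi res hlo
    simp only [solveLoop, altLoop]
    by_cases hle : lo ≤ hi
    · simp only [if_pos hle]
      have hmid := PySem.Int.floordiv_two_mid_bounds (lo := lo) (hi := hi) hle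
      have hc2 : 0 ≤ PySem.Int.floordiv (PySem.Int.floordiv (lo + hi) 2) 2 :=
        floordiv_two_nonneg _ (by omega)
      rw [solveInner_eq target nums 0 _ hc2]
      have harith :
          (0 + oddS target nums +
              2 * max 0 (maxS target nums - PySem.Int.floordiv (PySem.Int.floordiv (lo + hi) 2) 2)
            ≤ PySem.Int.floordiv (PySem.Int.floordiv (lo + hi) 2 + 1) 2)
          = (oddS target nums +
              2 * (if maxS target nums - PySem.Int.floordiv (PySem.Int.floordiv (lo + hi) 2) 2 < 0
                   then 0
                   else maxS target nums - PySem.Int.floordiv (PySem.Int.floordiv (lo + hi) 2) 2)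
            ≤ PySem.Int.floordiv (PySem.Int.floordiv (lo + hi) 2 + 1) 2) := by
        split_ifs with hs <;> (apply propext; constructor <;> intro <;> omega)
      by_cases hA :
          0 + oddS target nums +
              2 * max 0 (maxS target nums - PySem.Int.floordiv (PySem.Int.floordiv (lo + hi) 2) 2)
            ≤ PySem.Int.floordiv (PySem.Int.floordiv (lo + hi) 2 + 1) 2
      · rw [if_pos hA, if_pos (harith ▸ hA)]
        exact ih _ _ _ hlo
      · rw [if_neg hA, if_neg (harith ▸ hA)]
        exact ih _ _ _ (by omega)
    · simp only [if_neg hle]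

-- ===== VERDICT (by name: the statement is the Claim_ definition above) =====
theorem solve_spec : Claim_equal_solve := by
  intro target nums _
  show solve target nums = solve_alt target nums
  unfold solve solve_alt
  rw [altScan_spec]
  exact loop_eq target nums 200 0 (10 ^ 20) (-1) (by omega)
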